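-- pv_equiv track=rewrite | github.com/kokok22/Algorithm | Programmers/Level_2/N-digit Game.py | notation
-- ===== SOURCE A (Python) =====
-- ten_to_fifteen = {10:'A',11:'B',12:'C',13:'D',14:'E',15:'F'}
--
-- def notation(n,l): #n: 진법, l: 최대 길이
--     answer = '0'
--     number = 1
--     while True:
--         if len(answer) >= l:
--             break
--         result = []
--         num = number
--         while num:
--         	# 10부터 15사이의 수이면
--             if (num % n) in ten_to_fifteen.keys():
--                 result.insert(0, ten_to_fifteen[num%n])
--             else:
--                 result.insert(0, str(num % n)) #나머지를 저장하고
--             num = num // n #num은 몫으로 업데이트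
--         answer += ''.join(result)
--         number += 1
--     return answer
-- ===== SOURCE B (Python) =====
-- DIGITS = "ABCDEF"
--
-- def _to_base(num, n):
--     # base-n rendering of num via the division recurrence, recursively
--     if num == 0:
--         return ''
--     r = num % n
--     d = DIGITS[r - 10] if 10 <= r <= 15 else str(r)
--     return _to_base(num // n, n) + d
--
-- def notation(n, l):
--     parts = ['0']
--     length = 1
--     number = 1
--     while length < l:
--         s = _to_base(number, n)
--         parts.append(s)
--         length += len(s)
--         number += 1
--     return ''.join(parts)
-- ===== Notes on version B (the rewrite author's own statement) =====
-- stated objective: alternative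
-- what changed: The iterative inner loop that builds each base-n numeral with result.insert(0, ...) and a dict lookup is replaced by a recursive helper over the division recurrence with a range test into 'ABCDEF', and the growing string += is replaced by a parts list with a running length joined once at the end.
import Mathlib
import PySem

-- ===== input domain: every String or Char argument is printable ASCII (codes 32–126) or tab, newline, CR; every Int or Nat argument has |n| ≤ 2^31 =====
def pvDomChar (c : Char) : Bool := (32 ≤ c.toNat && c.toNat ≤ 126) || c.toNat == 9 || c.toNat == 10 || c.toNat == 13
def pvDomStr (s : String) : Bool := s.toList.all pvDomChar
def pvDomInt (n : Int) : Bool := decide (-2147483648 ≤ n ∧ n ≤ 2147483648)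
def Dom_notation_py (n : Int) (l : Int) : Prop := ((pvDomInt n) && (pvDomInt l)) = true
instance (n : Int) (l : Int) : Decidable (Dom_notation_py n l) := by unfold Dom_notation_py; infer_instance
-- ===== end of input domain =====

-- B replaces A's iterative insert-at-front digit construction and string += with a
-- recursive base-n helper over the division recurrence and a parts list joined once
-- (alternative decomposition, similar cost).


-- ===== PORT A =====
def tenToFifteen : PySem.Dict Int String :=
  PySem.Dict.ofList [(10, "A"), (11, "B"), (12, "C"), (13, "D"), (14, "E"), (15, "F")]

-- the body of A's inner if: '(num % n) in ten_to_fifteen.keys()' then dict lookup else str(num % n)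
def notationDigitA (r : Int) : String :=
  if tenToFifteen.contains r then (tenToFifteen.get? r).getD "" else PySem.Int.toStr r

-- A's inner 'while num:' loop: result.insert(0, digit); num = num // n.
-- Fuel: on Pre_ inputs (|n| ≥ 2) the loop runs at most num.natAbs + 2 iterations.
def notationDigitsA (n : Int) : Nat → Int → List String → List String
  | 0, _, result => result
  | fuel + 1, num, result =>
    if num ≠ 0 then
      notationDigitsA n fuel (PySem.Int.floordiv num n)
        (notationDigitA (PySem.Int.mod num n) :: result)
    else result

-- A's outer 'while True:' loop; breaks as soon as len(answer) >= l.
-- Fuel: on Pre_ inputs each iteration appends at least one character, so l.toNat + 1 suffices.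
def notationLoopA (n l : Int) : Nat → String → Int → String
  | 0, answer, _ => answer
  | fuel + 1, answer, number =>
    if PySem.Str.len answer ≥ l then answer
    else
      notationLoopA n l fuel
        (answer ++ PySem.Str.join "" (notationDigitsA n (number.natAbs + 2) number []))
        (number + 1)

def notation_py (n : Int) (l : Int) : String :=
  notationLoopA n l (l.toNat + 1) "0" 1

-- ===== PORT B =====
-- B's digit: "ABCDEF"[r-10] if 10 <= r <= 15 else str(r); the guard makes pyGet? always
-- some, and the one-character Python str is String.ofList [c]
def notationDigitB (r : Int) : String :=
  if 10 ≤ r ∧ r ≤ 15 then (PySem.Str.pyGet? "ABCDEF" (r - 10)).elim "" (fun c => String.ofList [c])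
  else PySem.Int.toStr r

-- B's recursive _to_base over the division recurrence (same fuel bound as A's inner loop)
def notationToBaseB (n : Int) : Nat → Int → String
  | 0, _ => ""
  | fuel + 1, num =>
    if num = 0 then ""
    else notationToBaseB n fuel (PySem.Int.floordiv num n) ++ notationDigitB (PySem.Int.mod num n)

-- B's 'while length < l:' loop accumulating parts and a running length
def notationLoopB (n l : Int) : Nat → List String → Int → Int → List String
  | 0, parts, _, _ => parts
  | fuel + 1, parts, length, number =>
    if length < l then
      notationLoopB n l fuel (parts ++ [notationToBaseB n (number.natAbs + 2) number])
        (length + PySem.Str.len (notationToBaseB n (number.natAbs + 2) number)) (number + 1)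
    else parts

def notation_py_alt (n : Int) (l : Int) : String :=
  PySem.Str.join "" (notationLoopB n l (l.toNat + 1) ["0"] 1 1)

-- ===== PRECONDITION & SPEC =====
-- Excluded (A returns no value there): with l ≥ 2, A loops forever for n = 1 and n = -1
-- and raises ZeroDivisionError for n = 0; every other input is admitted.
def Pre_notation_py (n : Int) (l : Int) : Prop := 2 ≤ n ∨ n ≤ -2 ∨ l ≤ 1
instance (n : Int) (l : Int) : Decidable (Pre_notation_py n l) := by
  unfold Pre_notation_py; infer_instance
def pvWitness_notation_py : Int × Int := (2, 5)

def Spec_notation_py (n : Int) (l : Int) (out : String) : Prop := out = notation_py_alt n l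
instance (n : Int) (l : Int) (out : String) : Decidable (Spec_notation_py n l out) := by
  unfold Spec_notation_py; infer_instance

-- ===== CLAIM (what is proved, stated in full; the proofs are below) =====
def Claim_equal_notation_py : Prop :=
  ∀ (n : Int) (l : Int), Dom_notation_py n l → Pre_notation_py n l →
    Spec_notation_py n l (notation_py n l)

-- ===== LEMMAS AND PROOFS =====
lemma pvJoin0_cons (x : String) (xs : List String) :
    PySem.Str.join "" (x :: xs) = x ++ PySem.Str.join "" xs := by
  apply String.toList_injective
  simp [PySem.Str.join, PySem.Chars.join, List.intercalate]
  cases xs <;> simp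

lemma pvJoin0_append_singleton (parts : List String) (s : String) :
    PySem.Str.join "" (parts ++ [s]) = PySem.Str.join "" parts ++ s := by
  induction parts with
  | nil =>
    apply String.toList_injective
    simp [PySem.Str.join, PySem.Chars.join, List.intercalate]
  | cons x rest ih => rw [List.cons_append, pvJoin0_cons, pvJoin0_cons, ih, String.append_assoc]

lemma pvLen_append (a b : String) :
    PySem.Str.len (a ++ b) = PySem.Str.len a + PySem.Str.len b := by
  simp [PySem.Str.len]

lemma pvDigit_eq (r : Int) : notationDigitA r = notationDigitB r := by
  unfold notationDigitA notationDigitB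
  by_cases h : 10 ≤ r ∧ r ≤ 15
  · obtain ⟨h1, h2⟩ := h
    interval_cases r <;> decide
  · rw [if_neg h, if_neg]
    rw [PySem.Dict.contains_eq_decide_mem_keys]
    have hk : tenToFifteen.keys = [10, 11, 12, 13, 14, 15] := by decide
    rw [hk]
    intro hm
    simp only [decide_eq_true_eq, List.mem_cons, List.not_mem_nil, or_false] at hm
    omega

lemma pvInner_eq (n : Int) :
    ∀ (fuel : Nat) (num : Int) (acc : List String),
      PySem.Str.join "" (notationDigitsA n fuel num acc) =
        notationToBaseB n fuel num ++ PySem.Str.join "" acc := by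
  intro fuel
  induction fuel with
  | zero => intro num acc; simp [notationDigitsA, notationToBaseB]
  | succ f ih =>
    intro num acc
    by_cases h : num = 0
    · simp [notationDigitsA, notationToBaseB, h]
    · rw [show notationDigitsA n (f + 1) num acc =
          notationDigitsA n f (PySem.Int.floordiv num n)
            (notationDigitA (PySem.Int.mod num n) :: acc) by
            simp [notationDigitsA, h],
        show notationToBaseB n (f + 1) num =
          notationToBaseB n f (PySem.Int.floordiv num n) ++
            notationDigitB (PySem.Int.mod num n) by simp [notationToBaseB, h]]
      rw [ih, pvJoin0_cons, pvDigit_eq, String.append_assoc]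

lemma pvOuter_eq (n l : Int) :
    ∀ (fuel : Nat) (parts : List String) (length number : Int),
      length = PySem.Str.len (PySem.Str.join "" parts) →
      notationLoopA n l fuel (PySem.Str.join "" parts) number =
        PySem.Str.join "" (notationLoopB n l fuel parts length number) := by
  intro fuel
  induction fuel with
  | zero => intro parts length number _; simp [notationLoopA, notationLoopB]
  | succ f ih =>
    intro parts length number hlen
    by_cases h : length < l
    · have hA : ¬ PySem.Str.len (PySem.Str.join "" parts) ≥ l := by omega
      rw [show notationLoopA n l (f + 1) (PySem.Str.join "" parts) number =
            notationLoopA n l f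
              (PySem.Str.join "" parts ++
                PySem.Str.join "" (notationDigitsA n (number.natAbs + 2) number []))
              (number + 1) by simp only [notationLoopA]; rw [if_neg hA],
          show notationLoopB n l (f + 1) parts length number =
            notationLoopB n l f (parts ++ [notationToBaseB n (number.natAbs + 2) number])
              (length + PySem.Str.len (notationToBaseB n (number.natAbs + 2) number))
              (number + 1) by simp only [notationLoopB]; rw [if_pos h]]
      have hs : PySem.Str.join "" (notationDigitsA n (number.natAbs + 2) number []) =
          notationToBaseB n (number.natAbs + 2) number := by
        rw [pvInner_eq]
        show _ ++ PySem.Str.join "" [] = _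
        have : PySem.Str.join "" ([] : List String) = "" := by decide
        rw [this, String.append_empty]
      rw [hs, ← pvJoin0_append_singleton]
      exact ih _ _ _ (by rw [pvJoin0_append_singleton, pvLen_append, hlen])
    · have hA : PySem.Str.len (PySem.Str.join "" parts) ≥ l := by omega
      simp only [notationLoopA, notationLoopB]
      rw [if_pos hA, if_neg h]

-- ===== VERDICT (by name: the statement is the Claim_ definition above) =====
theorem notation_py_spec : Claim_equal_notation_py := by
  intro n l _ _
  unfold Spec_notation_py notation_py notation_py_alt
  have h := pvOuter_eq n l (l.toNat + 1) ["0"] 1 1 (by decide)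
  rw [show PySem.Str.join "" ["0"] = "0" from by decide] at h
  exact h
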